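-- pv_equiv track=rewrite | github.com/s3cur3/PhylogeneticTreeBuilder | team_2_optimal_alignment_simple.py | scoreConsensusSequence
-- ===== SOURCE A (Python) =====
-- GAP_PENALTY = -7
--
-- MISMATCH = -2
--
-- MATCH = 1
--
-- def scoreConsensusSequence( consensusSequence, paddingChar='' ):
--     '''
--     Examines the consensus sequence and deduces what alignment must have produced
--     it. Uses that information to generate a new score.
--     @param consensusSequence The (assumedly randomized) consensus sequence
--     @param paddingChar A padding character that might appear in the sequence. If we
--                        see this character, we will ignore this location.
--     @return The score of the consensus sequence
--     '''
--     score = 0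
--     for letter in consensusSequence:
--         if letter in "ATCGU":
--             score += MATCH
--         elif letter in "X-":
--             score += GAP_PENALTY
--         elif letter == paddingChar:
--             score += 0
--         else: # was a mismatch
--             score += MISMATCH
--     return score
-- ===== SOURCE B (Python) =====
-- def scoreConsensusSequence(consensusSequence, paddingChar=''):
--     freq = {}
--     for letter in consensusSequence:
--         freq[letter] = freq.get(letter, 0) + 1
--     total = 0
--     for letter, n in freq.items():
--         if letter in "ATCGU":
--             w = 1
--         elif letter in "X-":
--             w = -7
--         elif letter == paddingChar:
--             w = 0
--         else:
--             w = -2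
--         total += w * n
--     return total
-- ===== Notes on version B (the rewrite author's own statement) =====
-- stated objective: alternative
-- what changed: B first builds a character frequency table in one pass, then classifies each distinct character once and sums weight*count, instead of A's per-character accumulation.
import Mathlib
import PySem

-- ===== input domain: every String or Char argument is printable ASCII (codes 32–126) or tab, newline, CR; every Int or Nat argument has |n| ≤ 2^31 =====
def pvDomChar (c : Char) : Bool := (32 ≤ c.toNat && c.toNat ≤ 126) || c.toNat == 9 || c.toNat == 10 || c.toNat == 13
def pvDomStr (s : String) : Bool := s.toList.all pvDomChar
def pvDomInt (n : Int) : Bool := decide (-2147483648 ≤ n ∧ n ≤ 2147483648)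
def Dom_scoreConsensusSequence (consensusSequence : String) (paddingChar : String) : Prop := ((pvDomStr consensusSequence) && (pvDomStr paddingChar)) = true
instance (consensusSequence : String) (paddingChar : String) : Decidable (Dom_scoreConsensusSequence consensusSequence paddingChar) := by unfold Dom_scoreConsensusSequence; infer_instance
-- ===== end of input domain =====

-- B replaces A's per-character accumulation by a frequency table (one counting pass,
-- then weight*count per distinct character, same branch order); objective: alternative.

-- ===== PORT A =====
def scoreConsensusSequence (consensusSequence : String) (paddingChar : String) : Int :=
  consensusSequence.toList.foldl (fun score letter =>
    if letter ∈ "ATCGU".toList then score + 1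
    else if letter ∈ "X-".toList then score + (-7)
    else if String.ofList [letter] = paddingChar then score + 0
    else score + (-2)) 0

-- ===== PORT B =====
def pvWeightB (letter : Char) (paddingChar : String) : Int :=
  if letter ∈ "ATCGU".toList then 1
  else if letter ∈ "X-".toList then -7
  else if String.ofList [letter] = paddingChar then 0
  else -2

def scoreConsensusSequence_alt (consensusSequence : String) (paddingChar : String) : Int :=
  let freq := consensusSequence.toList.foldl
    (fun d c => d.insert c (d.getD c 0 + 1)) PySem.Dict.empty
  freq.items.foldl (fun total kv => total + pvWeightB kv.1 paddingChar * kv.2) 0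

-- ===== PRECONDITION & SPEC =====
def Spec_scoreConsensusSequence (consensusSequence : String) (paddingChar : String) (out : Int) : Prop := out = scoreConsensusSequence_alt consensusSequence paddingChar
instance (consensusSequence : String) (paddingChar : String) (out : Int) : Decidable (Spec_scoreConsensusSequence consensusSequence paddingChar out) := by unfold Spec_scoreConsensusSequence; infer_instance

-- ===== CLAIM (what is proved, stated in full; the proofs are below) =====
def Claim_equal_scoreConsensusSequence : Prop := ∀ (consensusSequence : String) (paddingChar : String), Dom_scoreConsensusSequence consensusSequence paddingChar → Spec_scoreConsensusSequence consensusSequence paddingChar (scoreConsensusSequence consensusSequence paddingChar)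

-- ===== LEMMAS AND PROOFS =====

-- A's loop is accumulation of pvWeightB over the characters.
theorem pvA_foldl_weight (p : String) (l : List Char) (acc : Int) :
    l.foldl (fun score letter =>
      if letter ∈ "ATCGU".toList then score + 1
      else if letter ∈ "X-".toList then score + (-7)
      else if String.ofList [letter] = p then score + 0
      else score + (-2)) acc = acc + (l.map (fun c => pvWeightB c p)).sum := by
  induction l generalizing acc with
  | nil => simp
  | cons c t ih =>
    simp only [List.foldl_cons, List.map_cons, List.sum_cons, ih, pvWeightB]
    split_ifs <;> ring

-- adding one occurrence of a to the list adds f a to the weighted-count sum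
theorem pvSum_count_cons (f : Char → Int) (a : Char) (l : List Char) :
    ∀ ks : List Char, ks.Nodup → a ∈ ks →
      (ks.map (fun k => f k * ((a :: l).count k : Int))).sum
        = f a + (ks.map (fun k => f k * (l.count k : Int))).sum := by
  intro ks
  induction ks with
  | nil => intro _ h; cases h
  | cons b t ih =>
    intro hnd ha
    simp only [List.map_cons, List.sum_cons]
    by_cases hba : b = a
    · subst hba
      have hbt : b ∉ t := (List.nodup_cons.mp hnd).1
      have htail : (t.map (fun x => f x * ((b :: l).count x : Int))).sum
           = (t.map (fun x => f x * (l.count x : Int))).sum := by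
        apply congrArg
        apply List.map_congr_left
        intro x hx
        have hxb : ¬ (b = x) := fun h => hbt (h ▸ hx)
        simp [hxb]
      rw [htail, List.count_cons_self]
      push_cast
      ring
    · have hat : a ∈ t := by
        rcases List.mem_cons.mp ha with h | h
        · exact absurd h.symm hba
        · exact h
      rw [ih (List.nodup_cons.mp hnd).2 hat]
      have hab : ¬ (a = b) := fun h => hba h.symm
      simp [hab]
      ring

-- over any nodup key list covering l, the weighted-count sum is the plain weight sum
theorem pvSum_count (f : Char → Int) (l : List Char) :
    ∀ ks : List Char, ks.Nodup → (∀ x ∈ l, x ∈ ks) →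
      (ks.map (fun k => f k * (l.count k : Int))).sum = (l.map f).sum := by
  induction l with
  | nil =>
    intro ks _ _
    simp
  | cons a t ih =>
    intro ks hnd hsub
    rw [pvSum_count_cons f a t ks hnd (hsub a List.mem_cons_self),
      ih ks hnd (fun x hx => hsub x (List.mem_cons_of_mem a hx))]
    simp

-- ===== VERDICT (by name: the statement is the Claim_ definition above) =====
theorem scoreConsensusSequence_spec : Claim_equal_scoreConsensusSequence := by
  intro s p _
  show scoreConsensusSequence s p = scoreConsensusSequence_alt s p
  unfold scoreConsensusSequence scoreConsensusSequence_alt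
  rw [pvA_foldl_weight]
  simp only [PySem.Dict.foldl_insert_getD_add_one_eq_counter, PySem.Dict.items_counter,
    List.foldl_map, PySem.List.foldl_add]
  rw [pvSum_count (fun c => pvWeightB c p) s.toList (PySem.Set.ofList s.toList)
    (PySem.Set.nodup_ofList s.toList)
    (fun x hx => (PySem.Set.mem_ofList s.toList x).mpr hx)]
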